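-- pv_equiv track=rewrite | github.com/guangyitan/Bayes-theorem | assignment1.py | build_frequency_table
-- ===== SOURCE A (Python) =====
-- def build_frequency_table(column_value_list, labels):
-- 	'''
-- 	Count the frequency of each label for each column value
--
-- 	Parameters
-- 	column_value_list (list) : list of data of the same column
-- 	labels (list) : list of actual labels of the dataset
--
-- 	Returns
-- 	frequency_table (dict of dict) : dictionary with column value as key and frequency count of each lables
-- 		eg: {2: {0: 5, 1: 9}, 0: {0: 27, 1: 21}, 5: {1: 1}}
-- 	'''
-- 	# Count the frequency of each class label for each feature value
-- 	frequency_table = {}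
-- 	for feature_value, label in zip(column_value_list, labels):
-- 		if feature_value not in frequency_table:
-- 			frequency_table[feature_value] = {}
-- 		if label not in frequency_table[feature_value]:
-- 			frequency_table[feature_value][label] = 0
-- 		frequency_table[feature_value][label] += 1
--
-- 	return frequency_table
-- ===== SOURCE B (Python) =====
-- def build_frequency_table(column_value_list, labels):
--     ''' Count-then-reshape: tally (feature_value, label) pairs flat, then nest. '''
--     pair_counts = {}
--     for pair in zip(column_value_list, labels):
--         pair_counts[pair] = pair_counts.get(pair, 0) + 1
--     frequency_table = {}
--     for (feature_value, label), n in pair_counts.items():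
--         if feature_value not in frequency_table:
--             frequency_table[feature_value] = {}
--         frequency_table[feature_value][label] = n
--     return frequency_table
-- ===== Notes on version B (the rewrite author's own statement) =====
-- stated objective: alternative
-- what changed: Replaced the single incremental pass with nested membership guards by a two-pass count-then-reshape: first a flat tally of (feature_value, label) pairs, then one scatter loop nesting those counts.
import Mathlib
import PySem

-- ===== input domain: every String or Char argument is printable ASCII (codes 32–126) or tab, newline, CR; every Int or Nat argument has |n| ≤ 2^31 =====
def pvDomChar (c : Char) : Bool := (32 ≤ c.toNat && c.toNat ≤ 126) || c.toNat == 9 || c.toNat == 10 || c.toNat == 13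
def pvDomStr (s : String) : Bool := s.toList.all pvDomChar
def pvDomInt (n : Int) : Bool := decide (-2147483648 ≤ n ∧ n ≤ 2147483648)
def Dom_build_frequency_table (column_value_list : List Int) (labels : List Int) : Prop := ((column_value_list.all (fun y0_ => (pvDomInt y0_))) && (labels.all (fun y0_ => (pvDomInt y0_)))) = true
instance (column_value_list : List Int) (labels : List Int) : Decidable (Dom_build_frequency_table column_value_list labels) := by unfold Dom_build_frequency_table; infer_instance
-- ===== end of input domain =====

-- B replaces A's single incremental pass with nested membership guards by a two-pass
-- count-then-reshape (flat tally of (feature_value,label) pairs, then one scatter loop): alternative structure, same cost.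

-- ===== PORT A =====
-- the body of A's loop: guard-create the inner dict, guard-create the label slot, then += 1
def pvStepA (ft : PySem.Dict Int (PySem.Dict Int Int)) (p : Int × Int) : PySem.Dict Int (PySem.Dict Int Int) :=
  let ft := if ft.contains p.1 then ft else ft.insert p.1 PySem.Dict.empty
  let inner := ft.getD p.1 PySem.Dict.empty
  let inner := if inner.contains p.2 then inner else inner.insert p.2 0
  ft.insert p.1 (inner.insert p.2 (inner.getD p.2 0 + 1))

def build_frequency_table (column_value_list : List Int) (labels : List Int) : List (Int × List (Int × Int)) :=
  let frequency_table := (column_value_list.zip labels).foldl pvStepA PySem.Dict.empty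
  frequency_table.items.map (fun q => (q.1, q.2.items))

-- ===== PORT B =====
-- pass 1 body: flat tally pair_counts[pair] = pair_counts.get(pair, 0) + 1
def pvTally (d : PySem.Dict (Int × Int) Int) (pair : Int × Int) : PySem.Dict (Int × Int) Int :=
  d.insert pair (d.getD pair 0 + 1)

-- pass 2 body: scatter one ((feature_value, label), n) item into the nested table
def pvScatter (ft : PySem.Dict Int (PySem.Dict Int Int)) (it : (Int × Int) × Int) : PySem.Dict Int (PySem.Dict Int Int) :=
  let ft := if ft.contains it.1.1 then ft else ft.insert it.1.1 PySem.Dict.empty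
  ft.insert it.1.1 ((ft.getD it.1.1 PySem.Dict.empty).insert it.1.2 it.2)

def build_frequency_table_alt (column_value_list : List Int) (labels : List Int) : List (Int × List (Int × Int)) :=
  let pair_counts := (column_value_list.zip labels).foldl pvTally PySem.Dict.empty
  let frequency_table := pair_counts.items.foldl pvScatter PySem.Dict.empty
  frequency_table.items.map (fun q => (q.1, q.2.items))

-- ===== PRECONDITION & SPEC =====
def Spec_build_frequency_table (column_value_list : List Int) (labels : List Int) (out : List (Int × List (Int × Int))) : Prop := out = build_frequency_table_alt column_value_list labels
instance (column_value_list : List Int) (labels : List Int) (out : List (Int × List (Int × Int))) : Decidable (Spec_build_frequency_table column_value_list labels out) := by unfold Spec_build_frequency_table; infer_instance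

-- ===== CLAIM (what is proved, stated in full; the proofs are below) =====
def Claim_equal_build_frequency_table : Prop := ∀ (column_value_list : List Int) (labels : List Int), Dom_build_frequency_table column_value_list labels → Spec_build_frequency_table column_value_list labels (build_frequency_table column_value_list labels)

-- ===== LEMMAS AND PROOFS =====

-- the common normal form both sides are reduced to
def pvNorm (pairs : List (Int × Int)) : List (Int × List (Int × Int)) :=
  (PySem.Set.ofList (pairs.map (fun p => p.1))).map (fun f =>
    (f, (PySem.Set.ofList ((pairs.filter (fun p => p.1 == f)).map (fun p => p.2))).map
        (fun l => (l, (↑(((pairs.filter (fun p => p.1 == f)).map (fun p => p.2)).count l) : Int)))))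

-- A's guarded loop body collapses to one keyed insert
theorem pvStepA_eq (ft : PySem.Dict Int (PySem.Dict Int Int)) (p : Int × Int) :
    pvStepA ft p = ft.insert p.1
      ((ft.getD p.1 PySem.Dict.empty).insert p.2 ((ft.getD p.1 PySem.Dict.empty).getD p.2 0 + 1)) := by
  unfold pvStepA
  by_cases hc : ft.contains p.1
  · simp only [hc, if_true]
    by_cases hl : (ft.getD p.1 PySem.Dict.empty).contains p.2
    · simp only [hl, if_true]
    · have h2 : (ft.getD p.1 PySem.Dict.empty).getD p.2 0 = 0 :=
        PySem.Dict.getD_of_not_contains _ 0 (by simpa using hl)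
      simp only [hl, Bool.false_eq_true, if_false, PySem.Dict.getD_insert_self,
        PySem.Dict.insert_insert_self, h2]
  · have h1 : ft.getD p.1 PySem.Dict.empty = PySem.Dict.empty :=
      PySem.Dict.getD_of_not_contains ft PySem.Dict.empty (by simpa using hc)
    simp only [hc, Bool.false_eq_true, if_false, PySem.Dict.getD_insert_self, h1,
      PySem.Dict.contains_empty, PySem.Dict.insert_insert_self, PySem.Dict.getD_empty]

-- B's guarded scatter body collapses to one keyed insert
theorem pvScatter_eq (ft : PySem.Dict Int (PySem.Dict Int Int)) (it : (Int × Int) × Int) :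
    pvScatter ft it = ft.insert it.1.1
      ((ft.getD it.1.1 PySem.Dict.empty).insert it.1.2 it.2) := by
  unfold pvScatter
  by_cases hc : ft.contains it.1.1
  · simp only [hc, if_true]
  · have h1 : ft.getD it.1.1 PySem.Dict.empty = PySem.Dict.empty :=
      PySem.Dict.getD_of_not_contains ft PySem.Dict.empty (by simpa using hc)
    simp only [hc, Bool.false_eq_true, if_false, PySem.Dict.getD_insert_self, h1,
      PySem.Dict.insert_insert_self]

-- a keyed-insert loop: lookup at key f after the fold = per-key fold over the filtered items
theorem pv_getD_foldl_group {α : Type} (key : α → Int)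
    (upd : PySem.Dict Int Int → α → PySem.Dict Int Int)
    (L : List α) (d : PySem.Dict Int (PySem.Dict Int Int)) (f : Int) :
    (L.foldl (fun t a => t.insert (key a) (upd (t.getD (key a) PySem.Dict.empty) a)) d).getD f PySem.Dict.empty
      = (L.filter (fun a => key a == f)).foldl upd (d.getD f PySem.Dict.empty) := by
  induction L generalizing d with
  | nil => rfl
  | cons a L ih =>
    simp only [List.foldl_cons, List.filter_cons]
    by_cases h : key a = f
    · subst h
      simp only [BEq.rfl, if_pos, List.foldl_cons, ih]
      rw [PySem.Dict.getD_insert_self]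
    · have hb : (key a == f) = false := by simp [h]
      rw [hb]
      simp only [Bool.false_eq_true, if_false, ih]
      rw [PySem.Dict.getD_insert_of_ne _ _ _ (fun he => h he.symm)]

-- set(xs) then map then set = map then set
theorem pv_ofList_map_ofList {α β : Type} [BEq α] [LawfulBEq α] [BEq β] [LawfulBEq β]
    (g : α → β) (xs : List α) :
    PySem.Set.ofList ((PySem.Set.ofList xs).map g) = PySem.Set.ofList (xs.map g) := by
  induction xs using List.reverseRecOn with
  | nil => rfl
  | append_singleton xs x ih =>
    rw [PySem.Set.ofList_append_singleton, List.map_append, List.map_singleton,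
        PySem.Set.ofList_append_singleton]
    by_cases hx : x ∈ PySem.Set.ofList xs
    · rw [PySem.Set.add_of_mem hx, ih, PySem.Set.add_of_mem]
      rw [PySem.Set.mem_ofList]
      exact List.mem_map_of_mem ((PySem.Set.mem_ofList xs x).mp hx)
    · rw [PySem.Set.add_of_not_mem hx, List.map_append, List.map_singleton,
          PySem.Set.ofList_append_singleton, ih]

-- filter commutes with set(·) (first-occurrence dedup)
theorem pv_filter_ofList {α : Type} [BEq α] [LawfulBEq α] (p : α → Bool) (xs : List α) :
    (PySem.Set.ofList xs).filter p = PySem.Set.ofList (xs.filter p) := by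
  induction xs using List.reverseRecOn with
  | nil => rfl
  | append_singleton xs x ih =>
    rw [PySem.Set.ofList_append_singleton]
    by_cases hx : x ∈ PySem.Set.ofList xs
    · have hxs : x ∈ xs := (PySem.Set.mem_ofList xs x).mp hx
      rw [PySem.Set.add_of_mem hx, ih, List.filter_append]
      by_cases hp : p x
      · have hmem : x ∈ xs.filter p := List.mem_filter.mpr ⟨hxs, hp⟩
        simp only [List.filter_singleton, hp, cond_true]
        rw [PySem.Set.ofList_append_singleton,
            PySem.Set.add_of_mem ((PySem.Set.mem_ofList _ x).mpr hmem)]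
      · simp [hp]
    · rw [PySem.Set.add_of_not_mem hx, List.filter_append, List.filter_append, ih]
      by_cases hp : p x
      · have hxf : x ∉ PySem.Set.ofList (xs.filter p) := by
          rw [PySem.Set.mem_ofList]
          intro hmem
          exact hx ((PySem.Set.mem_ofList xs x).mpr (List.mem_filter.mp hmem).1)
        simp only [List.filter_singleton, hp, cond_true]
        rw [PySem.Set.ofList_append_singleton, PySem.Set.add_of_not_mem hxf]
      · simp [hp]

-- map by a function injective on the list commutes with set(·)
theorem pv_map_ofList_inj {α β : Type} [BEq α] [LawfulBEq α] [BEq β] [LawfulBEq β]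
    (g : α → β) (xs : List α) (hinj : ∀ a ∈ xs, ∀ b ∈ xs, g a = g b → a = b) :
    (PySem.Set.ofList xs).map g = PySem.Set.ofList (xs.map g) := by
  induction xs using List.reverseRecOn with
  | nil => rfl
  | append_singleton xs x ih =>
    have hinj' : ∀ a ∈ xs, ∀ b ∈ xs, g a = g b → a = b := fun a ha b hb =>
      hinj a (by simp [ha]) b (by simp [hb])
    rw [PySem.Set.ofList_append_singleton, List.map_append, List.map_singleton,
        PySem.Set.ofList_append_singleton]
    by_cases hx : x ∈ PySem.Set.ofList xs
    · rw [PySem.Set.add_of_mem hx, ih hinj', PySem.Set.add_of_mem]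
      rw [PySem.Set.mem_ofList]
      exact List.mem_map_of_mem ((PySem.Set.mem_ofList xs x).mp hx)
    · rw [PySem.Set.add_of_not_mem hx, List.map_append, List.map_singleton, ih hinj',
          PySem.Set.add_of_not_mem]
      rw [PySem.Set.mem_ofList]
      intro hmem
      obtain ⟨a, ha, hga⟩ := List.mem_map.mp hmem
      have hax : a = x := hinj a (by simp [ha]) x (by simp) hga
      exact hx ((PySem.Set.mem_ofList xs x).mpr (hax ▸ ha))

-- counting a pair in pairs = counting its label among the seconds of the pairs with its first
theorem pv_count_pair (pairs : List (Int × Int)) (k : Int × Int) :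
    pairs.count k = ((pairs.filter (fun p => p.1 == k.1)).map (fun p => p.2)).count k.2 := by
  induction pairs with
  | nil => rfl
  | cons p pairs ih =>
    by_cases h1 : p.1 = k.1
    · by_cases h2 : p.2 = k.2
      · have hpk : p = k := Prod.ext h1 h2
        simp [hpk, ih]
      · have hpk : p ≠ k := fun hc => h2 (by rw [hc])
        simp [h1, h2, hpk, ih]
    · have hpk : p ≠ k := fun hc => h1 (by rw [hc])
      simp [h1, hpk, ih]

-- A reduces to the normal form
theorem pv_A_norm (column_value_list labels : List Int) :
    build_frequency_table column_value_list labels = pvNorm (column_value_list.zip labels) := by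
  have hstep : pvStepA = fun (t : PySem.Dict Int (PySem.Dict Int Int)) (p : Int × Int) =>
      t.insert p.1 ((t.getD p.1 PySem.Dict.empty).insert p.2
        ((t.getD p.1 PySem.Dict.empty).getD p.2 0 + 1)) :=
    funext fun ft => funext fun p => pvStepA_eq ft p
  simp only [build_frequency_table, hstep]
  set pairs := column_value_list.zip labels with hpairs
  set T := pairs.foldl (fun (t : PySem.Dict Int (PySem.Dict Int Int)) (p : Int × Int) =>
      t.insert p.1 ((t.getD p.1 PySem.Dict.empty).insert p.2
        ((t.getD p.1 PySem.Dict.empty).getD p.2 0 + 1))) PySem.Dict.empty with hT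
  have hnd : T.keys.Nodup := by
    rw [hT]
    exact PySem.Dict.nodup_keys_foldl_insert_key pairs (fun p => p.1) _ PySem.Dict.empty
      PySem.Dict.nodup_keys_empty
  have hkeys : T.keys = PySem.Set.ofList (pairs.map (fun p => p.1)) := by
    rw [hT]
    rw [PySem.Dict.keys_foldl_insert_key pairs (fun p => p.1)
        (fun d p => (d.getD p.1 PySem.Dict.empty).insert p.2
          ((d.getD p.1 PySem.Dict.empty).getD p.2 0 + 1)) PySem.Dict.empty]
    rw [PySem.Dict.keys_empty, PySem.Set.update_nil_left]
  have hget : ∀ f : Int, T.getD f PySem.Dict.empty =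
      PySem.Dict.counter ((pairs.filter (fun p => p.1 == f)).map (fun p => p.2)) := by
    intro f
    rw [hT, pv_getD_foldl_group (fun p : Int × Int => p.1)
        (fun inner p => inner.insert p.2 (inner.getD p.2 0 + 1)) pairs PySem.Dict.empty f]
    rw [PySem.Dict.getD_empty, ← PySem.Dict.foldl_insert_getD_add_one_eq_counter,
        List.foldl_map]
  rw [PySem.Dict.items_eq_map_keys T hnd PySem.Dict.empty, List.map_map, hkeys]
  unfold pvNorm
  refine List.map_congr_left ?_
  intro f _
  simp only [Function.comp]
  rw [hget f, PySem.Dict.items_counter]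

-- B reduces to the normal form
theorem pv_B_norm (column_value_list labels : List Int) :
    build_frequency_table_alt column_value_list labels = pvNorm (column_value_list.zip labels) := by
  have htally : pvTally = fun (d : PySem.Dict (Int × Int) Int) (x : Int × Int) =>
      d.insert x (d.getD x 0 + 1) := rfl
  have hscat : pvScatter = fun (t : PySem.Dict Int (PySem.Dict Int Int)) (it : (Int × Int) × Int) =>
      t.insert it.1.1 ((t.getD it.1.1 PySem.Dict.empty).insert it.1.2 it.2) :=
    funext fun ft => funext fun it => pvScatter_eq ft it
  simp only [build_frequency_table_alt, htally, hscat]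
  set pairs := column_value_list.zip labels with hpairs
  rw [PySem.Dict.foldl_insert_getD_add_one_eq_counter, PySem.Dict.items_counter]
  set L := (PySem.Set.ofList pairs).map (fun k => (k, (↑(pairs.count k) : Int))) with hL
  set T := L.foldl (fun (t : PySem.Dict Int (PySem.Dict Int Int)) (it : (Int × Int) × Int) =>
      t.insert it.1.1 ((t.getD it.1.1 PySem.Dict.empty).insert it.1.2 it.2)) PySem.Dict.empty with hT
  have hnd : T.keys.Nodup := by
    rw [hT]
    exact PySem.Dict.nodup_keys_foldl_insert_key L (fun it => it.1.1) _ PySem.Dict.empty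
      PySem.Dict.nodup_keys_empty
  have hkeys : T.keys = PySem.Set.ofList (pairs.map (fun p => p.1)) := by
    rw [hT]
    rw [PySem.Dict.keys_foldl_insert_key L (fun it => it.1.1)
        (fun t it => (t.getD it.1.1 PySem.Dict.empty).insert it.1.2 it.2) PySem.Dict.empty]
    rw [PySem.Dict.keys_empty, PySem.Set.update_nil_left, hL, List.map_map]
    have : ((fun it : (Int × Int) × Int => it.1.1) ∘ fun k : Int × Int => (k, (↑(pairs.count k) : Int)))
        = fun k : Int × Int => k.1 := rfl
    rw [this, pv_ofList_map_ofList]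
  have hget : ∀ f : Int, (T.getD f PySem.Dict.empty).items =
      ((PySem.Set.ofList pairs).filter (fun k => k.1 == f)).map
        (fun a => (a.2, (↑(pairs.count a) : Int))) := by
    intro f
    rw [hT, pv_getD_foldl_group (fun it : (Int × Int) × Int => it.1.1)
        (fun inner it => inner.insert it.1.2 it.2) L PySem.Dict.empty f]
    rw [PySem.Dict.getD_empty, hL, List.filter_map]
    have hco : ((fun it : (Int × Int) × Int => it.1.1 == f) ∘ fun k : Int × Int => (k, (↑(pairs.count k) : Int)))
        = fun k : Int × Int => k.1 == f := rfl
    rw [hco, List.foldl_map]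
    set S := (PySem.Set.ofList pairs).filter (fun k => k.1 == f) with hS
    have hSnd : S.Nodup := (PySem.Set.nodup_ofList pairs).filter _
    have hSf : ∀ a ∈ S, a.1 = f := by
      intro a ha
      have := (List.mem_filter.mp ha).2
      simpa using this
    have hmapnd : (S.map (fun a : Int × Int => a.2)).Nodup := by
      refine List.Nodup.map_on ?_ hSnd
      intro x hx y hy hxy
      exact Prod.ext (by rw [hSf x hx, hSf y hy]) hxy
    have := PySem.Dict.items_foldl_insert_fresh S (fun a : Int × Int => a.2)
      (fun a : Int × Int => (↑(pairs.count a) : Int)) PySem.Dict.empty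
      (fun a _ => PySem.Dict.contains_empty _) hmapnd
    have he : (PySem.Dict.empty : PySem.Dict Int Int).items = [] := rfl
    rw [this, he, List.nil_append]
  rw [PySem.Dict.items_eq_map_keys T hnd PySem.Dict.empty, List.map_map, hkeys]
  unfold pvNorm
  refine List.map_congr_left ?_
  intro f _
  simp only [Function.comp]
  rw [hget f]
  have hms : PySem.Set.ofList ((pairs.filter (fun p => p.1 == f)).map (fun p => p.2))
      = ((PySem.Set.ofList pairs).filter (fun k => k.1 == f)).map (fun p => p.2) := by
    have hinj : ∀ a ∈ pairs.filter (fun p => p.1 == f), ∀ b ∈ pairs.filter (fun p => p.1 == f),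
        (fun p : Int × Int => p.2) a = (fun p : Int × Int => p.2) b → a = b := by
      intro a ha b hb hab
      have ha1 : a.1 = f := by simpa using (List.mem_filter.mp ha).2
      have hb1 : b.1 = f := by simpa using (List.mem_filter.mp hb).2
      exact Prod.ext (by rw [ha1, hb1]) (by simpa using hab)
    rw [← pv_map_ofList_inj _ _ hinj, ← pv_filter_ofList]
  rw [hms, List.map_map]
  refine congrArg (fun z => (f, z)) ?_
  refine List.map_congr_left ?_
  intro a ha
  have ha1 : a.1 = f := by simpa using (List.mem_filter.mp ha).2
  simp only [Function.comp]
  have := pv_count_pair pairs a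
  rw [ha1] at this
  rw [this]

-- ===== VERDICT (by name: the statement is the Claim_ definition above) =====
theorem build_frequency_table_spec : Claim_equal_build_frequency_table := by
  intro column_value_list labels _
  unfold Spec_build_frequency_table
  rw [pv_A_norm, pv_B_norm]
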